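-- pv_equiv track=rewrite | github.com/akshay-greenlang/Code-V1_GreenLang | GL-VCCI-Carbon-APP/VCCI-Scope3-Platform/services/agents/intake/parsers/pdf_ocr_parser.py | _parse_extracted_text
-- ===== SOURCE A (Python) =====
-- from typing import List, Dict, Any, Optional
--
-- def _parse_extracted_text(text: str) -> List[Dict[str, Any]]:
--     """
--     Parse extracted text into structured records.
--
--     Args:
--         text: Extracted text from PDF
--
--     Returns:
--         List of dictionaries with parsed data
--     """
--     if not text:
--         return []
--
--     # Simple line-by-line parsing (can be enhanced with regex patterns)
--     records = []
--     lines = text.split('\n')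
--
--     # Try to detect structured data (key-value pairs)
--     record = {}
--     for line in lines:
--         line = line.strip()
--         if not line:
--             if record:
--                 records.append(record)
--                 record = {}
--             continue
--
--         # Try to parse key-value pairs (e.g., "Field: Value")
--         if ':' in line:
--             parts = line.split(':', 1)
--             if len(parts) == 2:
--                 key = parts[0].strip().lower().replace(' ', '_')
--                 value = parts[1].strip()
--                 record[key] = value
--
--     # Add final record
--     if record:
--         records.append(record)
--
--     # If no structured data found, return full text as single record
--     if not records:
--         records = [{"raw_text": text}]
--
--     return records
-- ===== SOURCE B (Python) =====
-- def _kv(line):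
--     k, v = line.split(':', 1)
--     return k.strip().lower().replace(' ', '_'), v.strip()
--
--
-- def _parse_extracted_text(text):
--     if not text:
--         return []
--     # Phase 1: cut the lines into blocks of stripped non-blank lines.
--     blocks = []
--     cur = []
--     for line in text.split('\n'):
--         s = line.strip()
--         if s:
--             cur.append(s)
--         elif cur:
--             blocks.append(cur)
--             cur = []
--     if cur:
--         blocks.append(cur)
--     # Phase 2: each block becomes a dict of its "key: value" lines.
--     records = [d for d in (dict(_kv(l) for l in b if ':' in l) for b in blocks) if d]
--     return records or [{"raw_text": text}]
-- ===== Notes on version B (the rewrite author's own statement) =====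
-- stated objective: idiomatic
-- what changed: A's single stateful scan (one loop mixing block detection, dict building and flushing) is re-decomposed into two phases: segment the lines into blank-separated blocks, then map each block to a dict via a _kv helper and a comprehension with an `or` fallback.
import Mathlib
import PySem

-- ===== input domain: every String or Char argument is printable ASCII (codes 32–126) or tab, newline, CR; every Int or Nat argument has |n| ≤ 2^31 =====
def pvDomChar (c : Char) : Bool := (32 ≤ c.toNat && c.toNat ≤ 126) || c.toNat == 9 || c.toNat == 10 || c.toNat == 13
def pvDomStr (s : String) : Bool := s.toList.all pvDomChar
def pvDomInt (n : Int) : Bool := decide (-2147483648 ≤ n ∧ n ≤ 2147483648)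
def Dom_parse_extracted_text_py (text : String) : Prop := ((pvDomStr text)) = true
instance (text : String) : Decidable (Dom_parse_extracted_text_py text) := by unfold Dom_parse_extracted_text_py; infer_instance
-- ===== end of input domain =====

-- B re-decomposes A's single stateful scan into two phases (segment the lines into blank-separated
-- blocks, then turn each block into a dict); same return value, objective: idiomatic decomposition.

-- ===== PORT A =====
-- one iteration of A's for-loop; state = (records, record)
def pvStepA (s : List (PySem.Dict String String) × PySem.Dict String String) (line : String) :
    List (PySem.Dict String String) × PySem.Dict String String :=
  let l := PySem.Str.strip line
  if l == "" then
    (if s.2.items == [] then s else (s.1 ++ [s.2], PySem.Dict.empty))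
  else if PySem.Str.isIn ":" l then
    match PySem.Str.splitMax? l ":" 1 with
    | some [k, v] =>
        (s.1, s.2.insert (PySem.Str.replace (PySem.Str.lower (PySem.Str.strip k)) " " "_")
          (PySem.Str.strip v))
    | _ => s  -- the 'len(parts) == 2' guard failing: no insert
  else s

def parse_extracted_text_py (text : String) : List (List (String × String)) :=
  if text == "" then []
  else
    let st := ((PySem.Str.split? text "\n").getD []).foldl pvStepA ([], PySem.Dict.empty)
    let records := if st.2.items == [] then st.1 else st.1 ++ [st.2]
    if records == [] then [[("raw_text", text)]]
    else records.map (·.items)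

-- ===== PORT B =====
-- _kv: 'k, v = line.split(':', 1)' would raise ValueError without a ':'; that branch is
-- unreachable under the ':' filter in the caller and is ported as none/skip.
def pvKv (line : String) : Option (String × String) :=
  match PySem.Str.splitMax? line ":" 1 with
  | some [k, v] =>
      some (PySem.Str.replace (PySem.Str.lower (PySem.Str.strip k)) " " "_", PySem.Str.strip v)
  | _ => none

-- phase-1 step: collect stripped non-blank lines into the current block, close it on a blank line
def pvStepB (s : List (List String) × List String) (line : String) :
    List (List String) × List String :=
  let t := PySem.Str.strip line
  if t != "" then (s.1, s.2 ++ [t])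
  else if s.2 != [] then (s.1 ++ [s.2], [])
  else s

-- phase-2: dict(_kv(l) for l in b if ':' in l)
def pvBlockDict (b : List String) : PySem.Dict String String :=
  PySem.Dict.ofList ((b.filter (fun l => PySem.Str.isIn ":" l)).filterMap pvKv)

def parse_extracted_text_py_alt (text : String) : List (List (String × String)) :=
  if text == "" then []
  else
    let st := ((PySem.Str.split? text "\n").getD []).foldl pvStepB ([], [])
    let blocks := if st.2 != [] then st.1 ++ [st.2] else st.1
    let records := (blocks.map (fun b => (pvBlockDict b).items)).filter (fun d => d != [])
    if records == [] then [[("raw_text", text)]] else records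

-- ===== PRECONDITION & SPEC =====
def Spec_parse_extracted_text_py (text : String) (out : List (List (String × String))) : Prop := out = parse_extracted_text_py_alt text
instance (text : String) (out : List (List (String × String))) : Decidable (Spec_parse_extracted_text_py text out) := by unfold Spec_parse_extracted_text_py; infer_instance

-- ===== CLAIM (what is proved, stated in full; the proofs are below) =====
def Claim_equal_parse_extracted_text_py : Prop := ∀ (text : String), Dom_parse_extracted_text_py text → Spec_parse_extracted_text_py text (parse_extracted_text_py text)

-- ===== LEMMAS AND PROOFS =====

lemma pvBlockDict_nil : pvBlockDict [] = PySem.Dict.empty := rfl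

lemma pvBlockDict_snoc (cur : List String) (l : String) :
    pvBlockDict (cur ++ [l]) =
      if PySem.Str.isIn ":" l then
        match pvKv l with
        | some kv => (pvBlockDict cur).insert kv.1 kv.2
        | none => pvBlockDict cur
      else pvBlockDict cur := by
  by_cases hc : PySem.Chars.isIn [':'] l.toList = true
  · cases hkv : pvKv l with
    | none =>
        simp [pvBlockDict, List.filter_append, List.filterMap_append, hc, hkv]
    | some kv =>
        simp [pvBlockDict, List.filter_append, List.filterMap_append, hc, hkv,
          PySem.Dict.ofList, PySem.Dict.update, List.foldl_append]
  · simp [pvBlockDict, List.filter_append, hc]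

-- the filtered-dicts view of B's blocks, i.e. A's `records` accumulator
def pvRecs (blocks : List (List String)) : List (PySem.Dict String String) :=
  (blocks.map pvBlockDict).filter (fun d => d.items != [])

lemma pv_inv (lines : List String) (blocks : List (List String)) (cur : List String) :
    lines.foldl pvStepA (pvRecs blocks, pvBlockDict cur) =
      (pvRecs (lines.foldl pvStepB (blocks, cur)).1,
        pvBlockDict (lines.foldl pvStepB (blocks, cur)).2) := by
  induction lines generalizing blocks cur with
  | nil => simp
  | cons line rest ih =>
    simp only [List.foldl_cons]
    by_cases hl : PySem.Str.strip line = ""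
    · by_cases hcur : cur = []
      · have hA : pvStepA (pvRecs blocks, pvBlockDict cur) line = (pvRecs blocks, pvBlockDict cur) := by
          subst hcur; simp [pvStepA, hl, pvBlockDict_nil, PySem.Dict.empty]
        have hB : pvStepB (blocks, cur) line = (blocks, cur) := by
          subst hcur; simp [pvStepB, hl]
        rw [hA, hB]; exact ih blocks cur
      · have hB : pvStepB (blocks, cur) line = (blocks ++ [cur], []) := by
          simp [pvStepB, hl, hcur]
        rw [hB]
        by_cases hemp : (pvBlockDict cur).items = []
        · have hA : pvStepA (pvRecs blocks, pvBlockDict cur) line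
              = (pvRecs (blocks ++ [cur]), pvBlockDict []) := by
            have hc : pvBlockDict cur = pvBlockDict [] := PySem.Dict.ext hemp
            simp [pvStepA, hl, pvRecs, List.filter_append, hc, pvBlockDict_nil, PySem.Dict.empty]
          rw [hA]; exact ih (blocks ++ [cur]) []
        · have hA : pvStepA (pvRecs blocks, pvBlockDict cur) line
              = (pvRecs (blocks ++ [cur]), pvBlockDict []) := by
            simp [pvStepA, hl, hemp, pvRecs, List.filter_append, pvBlockDict_nil, PySem.Dict.empty]
          rw [hA]; exact ih (blocks ++ [cur]) []
    · have hB : pvStepB (blocks, cur) line = (blocks, cur ++ [PySem.Str.strip line]) := by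
        simp [pvStepB, hl]
      have hne : ¬((PySem.Str.strip line == "") = true) := by simpa using hl
      have hA : pvStepA (pvRecs blocks, pvBlockDict cur) line
          = (pvRecs blocks, pvBlockDict (cur ++ [PySem.Str.strip line])) := by
        rw [pvBlockDict_snoc]
        simp only [pvStepA]
        rw [if_neg hne]
        by_cases hc : PySem.Str.isIn ":" (PySem.Str.strip line) = true
        · rw [if_pos hc, if_pos hc]
          cases hkv : PySem.Str.splitMax? (PySem.Str.strip line) ":" 1 with
          | none => rw [show pvKv (PySem.Str.strip line) = none from by unfold pvKv; rw [hkv]]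
          | some parts =>
            rcases parts with _ | ⟨k, _ | ⟨v, _ | ⟨w, t⟩⟩⟩
            · rw [show pvKv (PySem.Str.strip line) = none from by unfold pvKv; rw [hkv]]
            · rw [show pvKv (PySem.Str.strip line) = none from by unfold pvKv; rw [hkv]]
            · rw [show pvKv (PySem.Str.strip line)
                    = some (PySem.Str.replace (PySem.Str.lower (PySem.Str.strip k)) " " "_",
                        PySem.Str.strip v) from by unfold pvKv; rw [hkv]]
            · rw [show pvKv (PySem.Str.strip line) = none from by unfold pvKv; rw [hkv]]
        · rw [if_neg hc, if_neg hc]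
      rw [hA, hB]; exact ih blocks (cur ++ [PySem.Str.strip line])

lemma pvRecs_map_items (blocks : List (List String)) :
    (pvRecs blocks).map (·.items) =
      (blocks.map (fun b => (pvBlockDict b).items)).filter (fun d => d != []) := by
  induction blocks with
  | nil => rfl
  | cons b t ih =>
    simp only [pvRecs, List.map_cons, List.filter_cons] at ih ⊢
    by_cases h : (pvBlockDict b).items = [] <;> simp [h, ih]

-- A's final 'if record: records.append(record)' matches B's closing of the last block
lemma pv_close (bs : List (List String)) (c : List String) :
    (if (pvBlockDict c).items == [] then pvRecs bs else pvRecs bs ++ [pvBlockDict c])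
      = pvRecs (if c != [] then bs ++ [c] else bs) := by
  by_cases hc : c = []
  · simp [hc, pvBlockDict_nil, PySem.Dict.empty, pvRecs]
  · by_cases hemp : (pvBlockDict c).items = [] <;>
      simp [hc, hemp, pvRecs, List.filter_append]

-- the common tail: empty-records fallback plus the Dict → items-list view
lemma pv_final (w : List (List (String × String))) (bs : List (List String)) :
    (if pvRecs bs == [] then w else (pvRecs bs).map (fun d => d.items))
      = (if ((bs.map (fun b => (pvBlockDict b).items)).filter (fun d => d != [])) == [] then w
         else (bs.map (fun b => (pvBlockDict b).items)).filter (fun d => d != [])) := by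
  rw [← pvRecs_map_items]
  by_cases h : pvRecs bs = []
  · simp [h]
  · simp [h]

-- ===== VERDICT (by name: the statement is the Claim_ definition above) =====
theorem parse_extracted_text_py_spec : Claim_equal_parse_extracted_text_py := by
  intro text _
  unfold Spec_parse_extracted_text_py parse_extracted_text_py parse_extracted_text_py_alt
  by_cases ht : text == ""
  · simp [ht]
  · simp only [ht, Bool.false_eq_true, if_false]
    rw [show (([] : List (PySem.Dict String String)), PySem.Dict.empty)
          = (pvRecs [], pvBlockDict []) from rfl, pv_inv, pv_close, pv_final]
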